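-- pv_equiv track=rewrite | github.com/wenhao-gao/substrate_scope_contrastive_learning | data/utils_chem.py | xyz2pyscf
-- ===== SOURCE A (Python) =====
-- def xyz2pyscf(xyz):
--     str_xyz = xyz.split()[1:]
--     str_pyscf = ''
--     for i in range(len(str_xyz)):
--         if (i+1)%4 == 0:
--             str_pyscf += str_xyz[i] + '; '
--         else:
--             str_pyscf += str_xyz[i] + ' '
--     return str_pyscf
-- ===== SOURCE B (Python) =====
-- def xyz2pyscf(xyz):
--     tokens = xyz.split()[1:]
--     parts = []
--     while tokens:
--         group, tokens = tokens[:4], tokens[4:]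
--         parts.append(' '.join(group) + ('; ' if len(group) == 4 else ' '))
--     return ''.join(parts)
-- ===== Notes on version B (the rewrite author's own statement) =====
-- stated objective: simpler
-- what changed: Replaced the index loop with an (i+1)%4 counter test by peeling explicit 4-token chunks (tokens[:4]/tokens[4:]) and joining within each chunk, collecting the pieces and joining them at the end.
import Mathlib
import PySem

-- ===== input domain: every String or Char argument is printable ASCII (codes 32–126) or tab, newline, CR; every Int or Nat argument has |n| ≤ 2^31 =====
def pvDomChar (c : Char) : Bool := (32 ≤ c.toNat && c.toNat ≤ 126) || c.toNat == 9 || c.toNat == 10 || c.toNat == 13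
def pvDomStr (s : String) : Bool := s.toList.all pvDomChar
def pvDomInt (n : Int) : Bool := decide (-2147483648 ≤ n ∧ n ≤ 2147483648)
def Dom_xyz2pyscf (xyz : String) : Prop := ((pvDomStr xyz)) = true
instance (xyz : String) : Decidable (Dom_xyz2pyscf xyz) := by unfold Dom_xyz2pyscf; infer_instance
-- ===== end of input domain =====

-- B replaces A's token-by-token loop with an `(i+1)%4` counter test by peeling explicit
-- 4-token chunks and joining within each chunk (objective: simpler decomposition, same cost).

-- ===== PORT A =====
-- literal port of A: split, drop the first token, then fold over range(len) with the (i+1)%4 test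
def xyz2pyscf (xyz : String) : String :=
  let str_xyz := PySem.List.slice (PySem.Str.split₀ xyz) (some 1) none
  (PySem.List.pyRange 0 (PySem.List.len str_xyz) 1).foldl
    (fun acc i =>
      if PySem.Int.mod (i + 1) 4 == 0 then
        acc ++ PySem.List.pyGetD str_xyz i "" ++ "; "
      else
        acc ++ PySem.List.pyGetD str_xyz i "" ++ " ") ""

-- ===== PORT B =====
-- the while-loop of Source B: peel tokens[:4] / tokens[4:] and emit one joined piece per chunk
def pvChunks : List String → List String
  | [] => []
  | t :: ts =>
    let g := (t :: ts).take 4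
    (PySem.Str.join " " g ++ (if g.length == 4 then "; " else " ")) :: pvChunks ((t :: ts).drop 4)
termination_by l => l.length
decreasing_by simp

def xyz2pyscf_alt (xyz : String) : String :=
  PySem.Str.join "" (pvChunks (PySem.List.slice (PySem.Str.split₀ xyz) (some 1) none))

-- ===== PRECONDITION & SPEC =====
def Spec_xyz2pyscf (xyz : String) (out : String) : Prop := out = xyz2pyscf_alt xyz
instance (xyz : String) (out : String) : Decidable (Spec_xyz2pyscf xyz out) := by unfold Spec_xyz2pyscf; infer_instance

-- ===== CLAIM (what is proved, stated in full; the proofs are below) =====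
def Claim_equal_xyz2pyscf : Prop := ∀ (xyz : String), Dom_xyz2pyscf xyz → Spec_xyz2pyscf xyz (xyz2pyscf xyz)

-- ===== LEMMAS AND PROOFS =====

-- A's loop body, as a function of (index, element)
def pvF : String → ℤ × String → String := fun acc p =>
  if PySem.Int.mod (p.1 + 1) 4 == 0 then acc ++ p.2 ++ "; " else acc ++ p.2 ++ " "

theorem pvMod4_false (i : ℤ) (h : (i + 1) % 4 ≠ 0) :
    (PySem.Int.mod (i + 1) 4 == 0) = false := by
  simp [PySem.Int.mod, Int.fmod_eq_emod]; omega

theorem pvMod4_true (i : ℤ) (h : (i + 1) % 4 = 0) :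
    (PySem.Int.mod (i + 1) 4 == 0) = true := by
  simp [PySem.Int.mod, Int.fmod_eq_emod]; omega

theorem pvJoinE_nil : PySem.Str.join "" [] = "" := by
  simp [PySem.Str.join, PySem.Chars.join, List.intercalate]

theorem pvJoin_single (sep p : String) : PySem.Str.join sep [p] = p := by
  simp [PySem.Str.join, PySem.Chars.join_singleton, String.ofList_toList]

theorem pvJoin_cons (sep p q : String) (rest : List String) :
    PySem.Str.join sep (p :: q :: rest) = p ++ sep ++ PySem.Str.join sep (q :: rest) := by
  simp [PySem.Str.join, PySem.Chars.join_cons_cons, String.ofList_append,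
    String.ofList_toList, String.append_assoc]

theorem pvJoinE_cons (p : String) (ps : List String) :
    PySem.Str.join "" (p :: ps) = p ++ PySem.Str.join "" ps := by
  cases ps with
  | nil => rw [pvJoin_single, pvJoinE_nil, String.append_empty]
  | cons q rest => rw [pvJoin_cons, String.append_empty]

theorem pvChunks_nil : pvChunks [] = [] := by
  rw [pvChunks.eq_def]

theorem pvChunks_cons (t : String) (ts : List String) :
    pvChunks (t :: ts)
      = (PySem.Str.join " " ((t :: ts).take 4)
          ++ (if ((t :: ts).take 4).length == 4 then "; " else " "))
        :: pvChunks ((t :: ts).drop 4) := by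
  rw [pvChunks.eq_def]

theorem pvEnum_cons (x : String) (l : List String) (s : ℤ) :
    PySem.List.enumerate (x :: l) s = (s, x) :: PySem.List.enumerate l (s + 1) := by
  simp [PySem.List.enumerate]

-- main invariant: A's loop, started at an index divisible by 4, produces B's chunked output
theorem pvLoop_eq (n : ℕ) : ∀ (l : List String), l.length ≤ n → ∀ (k : ℤ), k % 4 = 0 →
    ∀ acc : String, (PySem.List.enumerate l k).foldl pvF acc
      = acc ++ PySem.Str.join "" (pvChunks l) := by
  induction n with
  | zero =>
      intro l hl k hk acc
      have : l = [] := List.eq_nil_of_length_eq_zero (Nat.le_zero.mp hl)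
      subst this
      simp [PySem.List.enumerate, pvChunks_nil, pvJoinE_nil, String.append_empty]
  | succ n ih =>
      intro l hl k hk acc
      match l with
      | [] =>
          simp [PySem.List.enumerate, pvChunks_nil, pvJoinE_nil, String.append_empty]
      | [a] =>
          rw [pvEnum_cons]
          simp only [PySem.List.enumerate, List.foldl, pvF,
            pvMod4_false k (by omega)]
          simp [pvChunks_cons, pvChunks_nil, pvJoin_single, String.append_assoc]
      | [a, b] =>
          rw [pvEnum_cons, pvEnum_cons]
          simp only [PySem.List.enumerate, List.foldl, pvF,
            pvMod4_false k (by omega), pvMod4_false (k + 1) (by omega)]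
          simp [pvChunks_cons, pvChunks_nil, pvJoin_single, pvJoin_cons,
            String.append_assoc]
      | [a, b, c] =>
          rw [pvEnum_cons, pvEnum_cons, pvEnum_cons]
          simp only [PySem.List.enumerate, List.foldl, pvF,
            pvMod4_false k (by omega), pvMod4_false (k + 1) (by omega),
            pvMod4_false (k + 1 + 1) (by omega)]
          simp [pvChunks_cons, pvChunks_nil, pvJoin_single, pvJoin_cons,
            String.append_assoc]
      | a :: b :: c :: d :: rest =>
          rw [pvEnum_cons, pvEnum_cons, pvEnum_cons, pvEnum_cons]
          simp only [List.foldl, pvF,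
            pvMod4_false k (by omega), pvMod4_false (k + 1) (by omega),
            pvMod4_false (k + 1 + 1) (by omega),
            pvMod4_true (k + 1 + 1 + 1) (by omega)]
          rw [ih rest (by simp at hl ⊢; omega) (k + 1 + 1 + 1 + 1) (by omega)]
          simp [pvChunks_cons, pvJoinE_cons, pvJoin_single, pvJoin_cons,
            String.append_assoc]

-- ===== VERDICT (by name: the statement is the Claim_ definition above) =====
theorem xyz2pyscf_spec : Claim_equal_xyz2pyscf := by
  intro xyz _
  unfold Spec_xyz2pyscf xyz2pyscf xyz2pyscf_alt
  set l := PySem.List.slice (PySem.Str.split₀ xyz) (some 1) none with hl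
  have h1 : (PySem.List.pyRange 0 (PySem.List.len l) 1).foldl
      (fun acc i =>
        if PySem.Int.mod (i + 1) 4 == 0 then
          acc ++ PySem.List.pyGetD l i "" ++ "; "
        else
          acc ++ PySem.List.pyGetD l i "" ++ " ") ""
      = ((PySem.List.pyRange 0 (PySem.List.len l) 1).map
          (fun j => (j, PySem.List.pyGetD l j ""))).foldl pvF "" := by
    rw [List.foldl_map]; rfl
  rw [h1, ← PySem.List.enumerate_eq_map_pyRange l ""]
  rw [pvLoop_eq l.length l le_rfl 0 (by omega) ""]
  simp [String.empty_append]
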